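-- pv_equiv track=rewrite | github.com/jam928/python-algo | amazon_oa/count_analogous_arrays.py | count_analogous_arrays
-- ===== SOURCE A (Python) =====
-- def count_analogous_arrays(A, lower_bound, upper_bound):
--     mi = 0
--     mx = 0
--     total_sum = 0
--
--     for num in A:
--         total_sum += num
--         mi = min(mi, total_sum)
--         mx = max(mx, total_sum)
--
--     return max(0, upper_bound - lower_bound - (mx - mi) + 1)
-- ===== SOURCE B (Python) =====
-- def count_analogous_arrays(A, lower_bound, upper_bound):
--     # Divide and conquer: a segment's summary is (mi, mx, s) = (min prefix sum,
--     # max prefix sum -- both including the empty prefix 0 -- and total sum).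
--     # Two summaries merge exactly: prefixes of L+R are prefixes of L plus
--     # sum(L)-shifted prefixes of R.
--     def summarize(seg):
--         if not seg:
--             return (0, 0, 0)
--         if len(seg) == 1:
--             x = seg[0]
--             return (min(0, x), max(0, x), x)
--         mid = len(seg) // 2
--         miL, mxL, sL = summarize(seg[:mid])
--         miR, mxR, sR = summarize(seg[mid:])
--         return (min(miL, sL + miR), max(mxL, sL + mxR), sL + sR)
--
--     mi, mx, _ = summarize(A)
--     return max(0, upper_bound - lower_bound - (mx - mi) + 1)
-- ===== Notes on version B (the rewrite author's own statement) =====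
-- stated objective: alternative
-- what changed: Replaces A's single left-to-right running-min/max scan with a divide-and-conquer recursion that splits the array at the midpoint, computes each half's (min-prefix, max-prefix, total-sum) summary, and merges the two summaries.
import Mathlib
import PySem

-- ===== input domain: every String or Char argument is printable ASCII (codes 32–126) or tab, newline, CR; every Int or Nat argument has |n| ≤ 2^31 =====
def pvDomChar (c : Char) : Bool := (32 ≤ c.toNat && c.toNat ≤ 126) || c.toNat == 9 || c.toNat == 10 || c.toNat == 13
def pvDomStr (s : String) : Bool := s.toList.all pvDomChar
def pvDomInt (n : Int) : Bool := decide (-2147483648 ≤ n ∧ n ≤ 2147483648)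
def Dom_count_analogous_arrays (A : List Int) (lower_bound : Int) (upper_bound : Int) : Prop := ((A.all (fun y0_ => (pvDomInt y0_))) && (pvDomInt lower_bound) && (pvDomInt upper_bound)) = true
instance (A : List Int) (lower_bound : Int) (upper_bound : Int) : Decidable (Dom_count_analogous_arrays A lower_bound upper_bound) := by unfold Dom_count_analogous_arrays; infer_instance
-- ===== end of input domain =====

-- ===== PORT A =====
def count_analogous_arrays (A : List Int) (lower_bound : Int) (upper_bound : Int) : Int :=
  let st := A.foldl (fun (st : Int × Int × Int) num =>
    let total_sum := st.2.2 + num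
    (min st.1 total_sum, max st.2.1 total_sum, total_sum)) (0, 0, 0)
  max 0 (upper_bound - lower_bound - (st.2.1 - st.1) + 1)

-- ===== PORT B =====
-- B: divide and conquer; summarize seg = (min prefix sum, max prefix sum, total sum)
def pvSummarize : List Int → Int × Int × Int
  | [] => (0, 0, 0)
  | [x] => (min 0 x, max 0 x, x)
  | x :: y :: rest =>
      let seg := x :: y :: rest
      let mid := seg.length / 2
      let L := pvSummarize (seg.take mid)
      let R := pvSummarize (seg.drop mid)
      (min L.1 (L.2.2 + R.1), max L.2.1 (L.2.2 + R.2.1), L.2.2 + R.2.2)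
  termination_by l => l.length
  decreasing_by
    · simp; omega
    · simp; omega

def count_analogous_arrays_alt (A : List Int) (lower_bound : Int) (upper_bound : Int) : Int :=
  let s := pvSummarize A
  max 0 (upper_bound - lower_bound - (s.2.1 - s.1) + 1)

-- ===== PRECONDITION & SPEC =====
def Spec_count_analogous_arrays (A : List Int) (lower_bound : Int) (upper_bound : Int) (out : Int) : Prop := out = count_analogous_arrays_alt A lower_bound upper_bound
instance (A : List Int) (lower_bound : Int) (upper_bound : Int) (out : Int) : Decidable (Spec_count_analogous_arrays A lower_bound upper_bound out) := by unfold Spec_count_analogous_arrays; infer_instance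

-- ===== CLAIM (what is proved, stated in full; the proofs are below) =====
def Claim_equal_count_analogous_arrays : Prop := ∀ (A : List Int) (lower_bound : Int) (upper_bound : Int), Dom_count_analogous_arrays A lower_bound upper_bound → Spec_count_analogous_arrays A lower_bound upper_bound (count_analogous_arrays A lower_bound upper_bound)

-- ===== LEMMAS AND PROOFS =====
-- nonzero-prefix sums of l starting from running total s
def prefsAux (s : Int) : List Int → List Int
  | [] => []
  | x :: xs => (s + x) :: prefsAux (s + x) xs

def sumI (l : List Int) : Int := l.foldl (· + ·) 0

theorem foldl_add_shift (t : List Int) (a b : Int) :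
    t.foldl (· + ·) (a + b) = a + t.foldl (· + ·) b := by
  induction t generalizing b with
  | nil => rfl
  | cons y ys ih => simp only [List.foldl]; rw [show a + b + y = a + (b + y) by ring, ih]

theorem sumI_cons (x : Int) (xs : List Int) : sumI (x :: xs) = x + sumI xs := by
  simp only [sumI, List.foldl]
  rw [show (0 : Int) + x = x + 0 by ring, foldl_add_shift]

theorem foldA_eq (l : List Int) : ∀ (mi mx s : Int),
    l.foldl (fun (st : Int × Int × Int) num =>
      let total_sum := st.2.2 + num
      (min st.1 total_sum, max st.2.1 total_sum, total_sum)) (mi, mx, s)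
    = ((prefsAux s l).foldl min mi, (prefsAux s l).foldl max mx, s + sumI l) := by
  induction l with
  | nil => intro mi mx s; simp [prefsAux, sumI]
  | cons x xs ih =>
    intro mi mx s
    simp only [List.foldl, prefsAux, ih, sumI_cons]
    ring_nf

theorem prefsAux_shift (s : Int) (l : List Int) : ∀ t : Int,
    prefsAux (s + t) l = (prefsAux t l).map (s + ·) := by
  induction l with
  | nil => intro t; rfl
  | cons x xs ih =>
    intro t
    simp only [prefsAux, List.map, add_assoc, ih]

theorem prefsAux_append (L R : List Int) : ∀ s : Int,
    prefsAux s (L ++ R) = prefsAux s L ++ prefsAux (s + sumI L) R := by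
  induction L with
  | nil => intro s; simp [prefsAux, sumI]
  | cons x xs ih =>
    intro s
    simp only [List.cons_append, prefsAux, ih, sumI_cons, List.cons.injEq, true_and]
    rw [show s + x + sumI xs = s + (x + sumI xs) by ring]

theorem foldl_min_map_add (s : Int) (xs : List Int) : ∀ a : Int,
    (xs.map (s + ·)).foldl min (s + a) = s + xs.foldl min a := by
  induction xs with
  | nil => intro a; rfl
  | cons y ys ih =>
    intro a
    simp only [List.map, List.foldl]
    rw [min_add_add_left, ih]

theorem foldl_max_map_add (s : Int) (xs : List Int) : ∀ a : Int,
    (xs.map (s + ·)).foldl max (s + a) = s + xs.foldl max a := by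
  induction xs with
  | nil => intro a; rfl
  | cons y ys ih =>
    intro a
    simp only [List.map, List.foldl]
    rw [max_add_add_left, ih]

theorem foldl_min_min (xs : List Int) : ∀ a b : Int,
    xs.foldl min (min a b) = min a (xs.foldl min b) := by
  induction xs with
  | nil => intro a b; rfl
  | cons y ys ih => intro a b; simp only [List.foldl, min_assoc, ih]

theorem foldl_max_max (xs : List Int) : ∀ a b : Int,
    xs.foldl max (max a b) = max a (xs.foldl max b) := by
  induction xs with
  | nil => intro a b; rfl
  | cons y ys ih => intro a b; simp only [List.foldl, max_assoc, ih]

theorem foldl_min_le_init (xs : List Int) : ∀ a : Int, xs.foldl min a ≤ a := by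
  induction xs with
  | nil => intro a; exact le_refl a
  | cons y ys ih =>
    intro a
    exact le_trans (ih (min a y)) (min_le_left a y)

theorem foldl_max_le_init (xs : List Int) : ∀ a : Int, a ≤ xs.foldl max a := by
  induction xs with
  | nil => intro a; exact le_refl a
  | cons y ys ih =>
    intro a
    exact le_trans (le_max_left a y) (ih (max a y))

theorem foldl_min_le_mem (xs : List Int) : ∀ (a x : Int), x ∈ xs → xs.foldl min a ≤ x := by
  induction xs with
  | nil => intro a x hx; cases hx
  | cons y ys ih =>
    intro a x hx
    rcases List.mem_cons.mp hx with h | h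
    · subst h
      exact le_trans (foldl_min_le_init ys (min a x)) (min_le_right a x)
    · exact ih _ _ h

theorem mem_foldl_max (xs : List Int) : ∀ (a x : Int), x ∈ xs → x ≤ xs.foldl max a := by
  induction xs with
  | nil => intro a x hx; cases hx
  | cons y ys ih =>
    intro a x hx
    rcases List.mem_cons.mp hx with h | h
    · subst h
      exact le_trans (le_max_right a x) (foldl_max_le_init ys (max a x))
    · exact ih _ _ h

theorem sum_mem_prefsAux (l : List Int) (hl : l ≠ []) : ∀ s : Int, s + sumI l ∈ prefsAux s l := by
  induction l with
  | nil => exact absurd rfl hl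
  | cons x xs ih =>
    intro s
    rw [sumI_cons, show s + (x + sumI xs) = (s + x) + sumI xs by ring]
    by_cases h : xs = []
    · subst h; simp [prefsAux, sumI]
    · exact List.mem_cons_of_mem _ (ih h (s + x))

theorem pvSummarize_eq (l : List Int) :
    pvSummarize l = ((prefsAux 0 l).foldl min 0, (prefsAux 0 l).foldl max 0, sumI l) := by
  induction l using pvSummarize.induct with
  | case1 => simp [pvSummarize, prefsAux, sumI]
  | case2 x =>
    simp [pvSummarize, prefsAux, sumI]
  | case3 x y rest segv midv ihL ihR =>
    rw [pvSummarize]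
    have hseg : segv = x :: y :: rest := rfl
    have hmid : midv = segv.length / 2 := rfl
    rw [← hseg, ← hmid]
    simp only [ihL, ihR]
    have hlen : 2 ≤ segv.length := by rw [hseg]; simp
    have hmid1 : 1 ≤ midv := by omega
    have hmidlt : midv < segv.length := by omega
    have hL : segv.take midv ≠ [] := by
      intro h
      have := congrArg List.length h
      simp at this; omega
    have hsplit : segv = segv.take midv ++ segv.drop midv := (List.take_append_drop midv segv).symm
    set L := segv.take midv
    set R := segv.drop midv
    have hmem : (0 : Int) + sumI L ∈ prefsAux 0 L := sum_mem_prefsAux L hL 0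
    have hmiL : (prefsAux 0 L).foldl min 0 ≤ sumI L := by
      have := foldl_min_le_mem (prefsAux 0 L) 0 (0 + sumI L) hmem
      simpa using this
    have hmxL : sumI L ≤ (prefsAux 0 L).foldl max 0 := by
      have := mem_foldl_max (prefsAux 0 L) 0 (0 + sumI L) hmem
      simpa using this
    have hshift : prefsAux (0 + sumI L) R = (prefsAux 0 R).map (sumI L + ·) := by
      rw [show (0 : Int) + sumI L = sumI L + 0 by ring, prefsAux_shift]
    rw [show prefsAux 0 segv = prefsAux 0 (L ++ R) by rw [← hsplit],
        show sumI segv = sumI (L ++ R) by rw [← hsplit],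
        prefsAux_append, List.foldl_append, List.foldl_append, hshift]
    refine Prod.ext ?_ (Prod.ext ?_ ?_)
    · show min ((prefsAux 0 L).foldl min 0) (sumI L + (prefsAux 0 R).foldl min 0)
        = ((prefsAux 0 R).map (sumI L + ·)).foldl min ((prefsAux 0 L).foldl min 0)
      rw [show sumI L + (prefsAux 0 R).foldl min 0
            = ((prefsAux 0 R).map (sumI L + ·)).foldl min (sumI L + 0) by rw [foldl_min_map_add],
          ← foldl_min_min]
      congr 1
      rw [add_zero]
      exact min_eq_left hmiL
    · show max ((prefsAux 0 L).foldl max 0) (sumI L + (prefsAux 0 R).foldl max 0)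
        = ((prefsAux 0 R).map (sumI L + ·)).foldl max ((prefsAux 0 L).foldl max 0)
      rw [show sumI L + (prefsAux 0 R).foldl max 0
            = ((prefsAux 0 R).map (sumI L + ·)).foldl max (sumI L + 0) by rw [foldl_max_map_add],
          ← foldl_max_max]
      congr 1
      rw [add_zero]
      exact max_eq_left hmxL
    · show sumI L + sumI R = sumI (L ++ R)
      rw [show sumI (L ++ R) = (L ++ R).foldl (· + ·) 0 from rfl, List.foldl_append]
      rw [show L.foldl (· + ·) 0 = sumI L + 0 from (add_zero _).symm, foldl_add_shift]
      rfl

-- ===== VERDICT (by name: the statement is the Claim_ definition above) =====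
theorem count_analogous_arrays_spec : Claim_equal_count_analogous_arrays := by
  intro A lower_bound upper_bound _
  unfold Spec_count_analogous_arrays count_analogous_arrays count_analogous_arrays_alt
  rw [foldA_eq, pvSummarize_eq]
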